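-- pv_equiv track=rewrite | github.com/jashwanthsai678/maize_hostinhg | blended_predictor.py | max_consecutive
-- ===== SOURCE A (Python) =====
-- def max_consecutive(condition_arr):
--     best = 0
--     cur = 0
--     for v in condition_arr:
--         if v:
--             cur += 1
--             best = max(best, cur)
--         else:
--             cur = 0
--     return best
-- ===== SOURCE B (Python) =====
-- def max_consecutive(condition_arr):
--     lengths = []
--     i, n = 0, len(condition_arr)
--     while i < n:
--         b = bool(condition_arr[i])
--         j = i + 1
--         while j < n and bool(condition_arr[j]) == b:
--             j += 1
--         if b:
--             lengths.append(j - i)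
--         i = j
--     return max(lengths, default=0)
-- ===== Notes on version B (the rewrite author's own statement) =====
-- stated objective: alternative
-- what changed: B splits the array into maximal runs of equal truthiness (groupby-style scan), collects the lengths of the truthy runs, and returns their maximum (default 0), replacing A's running best/cur scalar accumulation.
import Mathlib
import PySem

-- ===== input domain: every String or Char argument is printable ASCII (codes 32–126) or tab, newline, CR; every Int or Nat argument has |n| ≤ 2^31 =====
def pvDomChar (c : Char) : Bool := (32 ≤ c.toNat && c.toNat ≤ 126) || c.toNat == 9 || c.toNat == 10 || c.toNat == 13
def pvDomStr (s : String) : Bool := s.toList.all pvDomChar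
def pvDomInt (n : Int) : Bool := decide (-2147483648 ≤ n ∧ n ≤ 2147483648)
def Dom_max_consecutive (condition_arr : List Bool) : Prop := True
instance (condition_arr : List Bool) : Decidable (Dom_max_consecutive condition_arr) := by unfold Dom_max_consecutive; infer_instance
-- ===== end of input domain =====

-- B rewrites A's running best/cur accumulation as a groupby-style pass: split into maximal
-- runs of equal truthiness, collect the lengths of the truthy runs, return their max (default 0).

-- ===== PORT A =====
-- the for-loop over condition_arr with state (best, cur)
def loopA : List Bool → Int → Int → Int
  | [], best, _ => best
  | v :: t, best, cur =>
    if v then loopA t (max best (cur + 1)) (cur + 1)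
    else loopA t best 0

def max_consecutive (condition_arr : List Bool) : Int :=
  loopA condition_arr 0 0

-- ===== PORT B =====
-- the outer while-loop of Source B: split the list into maximal runs of equal values, with lengths
def runs : List Bool → List (Bool × Nat)
  | [] => []
  | b :: rest =>
    (b, (rest.takeWhile (· == b)).length + 1) :: runs (rest.dropWhile (· == b))
termination_by l => l.length
decreasing_by
  exact Nat.lt_succ_of_le (List.length_dropWhile_le _ _)

-- port of Python's max(lengths, default=0)
def pyMaxD0 : List Int → Int
  | [] => 0
  | h :: t => t.foldl max h

def max_consecutive_alt (condition_arr : List Bool) : Int :=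
  pyMaxD0 ((runs condition_arr).filterMap (fun bn => if bn.1 then some (bn.2 : Int) else none))

-- ===== PRECONDITION & SPEC =====
def Spec_max_consecutive (condition_arr : List Bool) (out : Int) : Prop := out = max_consecutive_alt condition_arr
instance (condition_arr : List Bool) (out : Int) : Decidable (Spec_max_consecutive condition_arr out) := by unfold Spec_max_consecutive; infer_instance

-- ===== CLAIM (what is proved, stated in full; the proofs are below) =====
def Claim_equal_max_consecutive : Prop := ∀ (condition_arr : List Bool), Dom_max_consecutive condition_arr → Spec_max_consecutive condition_arr (max_consecutive condition_arr)

-- ===== LEMMAS AND PROOFS =====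

-- reference function: longest truthy run of l, given a current open run of length cur
def altFrom : Int → List Bool → Int
  | cur, [] => cur
  | cur, true :: t => altFrom (cur + 1) t
  | cur, false :: t => max cur (altFrom 0 t)

theorem le_altFrom : ∀ (l : List Bool) (cur : Int), cur ≤ altFrom cur l := by
  intro l
  induction l with
  | nil => intro cur; simp [altFrom]
  | cons v t ih =>
    intro cur
    cases v
    · simp [altFrom]
    · exact le_trans (by omega) (ih (cur + 1))

theorem loopA_eq : ∀ (l : List Bool) (best cur : Int), 0 ≤ cur → cur ≤ best →
    loopA l best cur = max best (altFrom cur l) := by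
  intro l
  induction l with
  | nil =>
    intro best cur h0 hb
    simp only [loopA, altFrom]
    exact (max_eq_left hb).symm
  | cons v t ih =>
    intro best cur h0 hb
    cases v
    · show loopA t best 0 = max best (max cur (altFrom 0 t))
      rw [ih best 0 le_rfl (le_trans h0 hb), ← max_assoc, max_eq_left hb]
    · show loopA t (max best (cur + 1)) (cur + 1) = max best (altFrom (cur + 1) t)
      rw [ih (max best (cur + 1)) (cur + 1) (by omega) (le_max_right _ _),
        max_assoc, max_eq_right (le_altFrom t (cur + 1))]

theorem foldl_max_shift : ∀ (t : List Int) (a b : Int),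
    t.foldl max (max a b) = max a (t.foldl max b) := by
  intro t
  induction t with
  | nil => intro a b; rfl
  | cons x t ih =>
    intro a b
    show t.foldl max (max (max a b) x) = max a (t.foldl max (max b x))
    rw [max_assoc, ih]

theorem foldl_max_pyMaxD0 : ∀ (L : List Int) (a : Int), 0 ≤ a →
    L.foldl max a = max a (pyMaxD0 L) := by
  intro L a h0
  cases L with
  | nil => exact (max_eq_left h0).symm
  | cons h t =>
    show t.foldl max (max a h) = max a (pyMaxD0 (h :: t))
    rw [foldl_max_shift]; rfl

theorem altFrom_append_true : ∀ (p : List Bool) (q : List Bool) (cur : Int),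
    (∀ x ∈ p, x = true) → altFrom cur (p ++ q) = altFrom (cur + p.length) q := by
  intro p
  induction p with
  | nil => intro q cur _; simp
  | cons x p ih =>
    intro q cur h
    have hx : x = true := h x (by simp)
    subst hx
    show altFrom (cur + 1) (p ++ q) = altFrom (cur + ((p.length : Int) + 1)) q
    rw [ih q (cur + 1) (fun y hy => h y (by simp [hy]))]
    congr 1
    omega

theorem altFrom_append_false : ∀ (p : List Bool) (q : List Bool),
    (∀ x ∈ p, x = false) → altFrom 0 (p ++ q) = altFrom 0 q := by
  intro p
  induction p with
  | nil => intro q _; simp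
  | cons x p ih =>
    intro q h
    have hx : x = false := h x (by simp)
    subst hx
    show max 0 (altFrom 0 (p ++ q)) = altFrom 0 q
    rw [max_eq_right (le_altFrom (p ++ q) 0), ih q (fun y hy => h y (by simp [hy]))]

theorem dropWhile_head_ne : ∀ (l : List Bool) (b x : Bool) (t : List Bool),
    l.dropWhile (· == b) = x :: t → x ≠ b := by
  intro l
  induction l with
  | nil => intro b x t h; simp [List.dropWhile] at h
  | cons a l ih =>
    intro b x t h
    by_cases hab : a = b
    · subst hab
      rw [List.dropWhile_cons_of_pos (by simp)] at h
      exact ih a x t h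
    · rw [List.dropWhile_cons_of_neg (by simpa using hab)] at h
      cases h
      exact hab

theorem alt_eq_altFrom : ∀ (l : List Bool), max_consecutive_alt l = altFrom 0 l := by
  intro l
  induction l using runs.induct with
  | case1 => simp [max_consecutive_alt, runs, pyMaxD0, altFrom]
  | case2 b rest ih =>
    have hsplit : rest.takeWhile (· == b) ++ rest.dropWhile (· == b) = rest :=
      List.takeWhile_append_dropWhile
    cases b
    · -- falsy group: its length is dropped by the filter
      simp only [max_consecutive_alt] at ih ⊢
      rw [runs]
      simp only [altFrom]
      rw [List.filterMap_cons_none (by rfl)]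
      rw [max_eq_right (le_altFrom rest 0)]
      conv_rhs => rw [← hsplit]
      rw [altFrom_append_false _ _
        (fun x hx => by simpa using List.mem_takeWhile_imp hx)]
      exact ih
    · -- truthy group of length takeWhile+1
      simp only [max_consecutive_alt] at ih ⊢
      rw [runs]
      simp only [altFrom]
      rw [List.filterMap_cons_some (by rfl)]
      show List.foldl max (((rest.takeWhile (· == true)).length + 1 : Nat) : Int) _ =
        altFrom (0 + 1) rest
      rw [foldl_max_pyMaxD0 _ _ (by positivity)]
      rw [ih]
      conv_rhs => rw [← hsplit]
      rw [altFrom_append_true _ _ _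
        (fun x hx => by simpa using List.mem_takeWhile_imp hx)]
      -- remaining: altFrom (0 + 1 + k) q = max (k+1) (altFrom 0 q) for q = dropWhile (· == true) rest
      generalize hq : rest.dropWhile (· == true) = q
      cases q with
      | nil =>
        simp only [altFrom]
        push_cast; omega
      | cons x q' =>
        have hx : x = false := by
          have := dropWhile_head_ne rest true x q' hq
          cases x
          · rfl
          · exact absurd rfl this
        subst hx
        simp only [altFrom]
        push_cast; omega

-- ===== VERDICT (by name: the statement is the Claim_ definition above) =====
theorem max_consecutive_spec : Claim_equal_max_consecutive := by
  intro l _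
  show max_consecutive l = max_consecutive_alt l
  rw [max_consecutive, loopA_eq l 0 0 le_rfl le_rfl,
    max_eq_right (le_altFrom l 0), alt_eq_altFrom]
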